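-- pv_equiv track=rewrite | github.com/JianghanLi/LintCode | problems/1468. 不重复的两个数/li.py | theTwoNumbers
-- ===== SOURCE A (Python) =====
-- def theTwoNumbers(a):
--     # Write your code here
--     s = set()
--     for i in a:
--         if i in s:
--             s.remove(i)
--         else:
--             s.add(i)
--     return sorted(s)
-- ===== SOURCE B (Python) =====
-- def theTwoNumbers(a):
--     # Count-first, parity-filter: build a frequency table, keep odd-count values.
--     counts = {}
--     for i in a:
--         counts[i] = counts.get(i, 0) + 1
--     return sorted(k for k, v in counts.items() if v % 2 == 1)
-- ===== Notes on version B (the rewrite author's own statement) =====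
-- stated objective: idiomatic
-- what changed: Replaces the membership-toggling set pass (add if absent, remove if present) with a count-then-filter decomposition: one pass builds a frequency dict, then the keys with odd counts are sorted.
import Mathlib
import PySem

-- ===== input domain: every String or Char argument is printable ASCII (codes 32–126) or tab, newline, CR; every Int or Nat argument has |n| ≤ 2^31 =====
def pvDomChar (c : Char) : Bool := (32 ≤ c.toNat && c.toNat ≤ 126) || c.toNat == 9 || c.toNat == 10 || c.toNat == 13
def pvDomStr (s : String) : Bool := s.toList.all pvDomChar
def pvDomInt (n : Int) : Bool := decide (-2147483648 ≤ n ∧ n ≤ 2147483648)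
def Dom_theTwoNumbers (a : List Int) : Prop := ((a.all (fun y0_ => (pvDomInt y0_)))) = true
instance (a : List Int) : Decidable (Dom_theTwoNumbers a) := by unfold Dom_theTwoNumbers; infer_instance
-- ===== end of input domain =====

-- B replaces A's membership-toggling set pass with a count-then-parity-filter decomposition (idiomatic; same cost).

-- ===== PORT A =====
-- the toggling loop: 'if i in s: s.remove(i) else: s.add(i)' (remove under the contains guard = discard)
def theTwoNumbers (a : List Int) : List Int :=
  let s : PySem.Set Int :=
    a.foldl (fun s i => if PySem.Set.contains s i then PySem.Set.discard s i else PySem.Set.add s i)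
      PySem.Set.empty
  PySem.List.sorted s (fun x => x) false

-- ===== PORT B =====
def theTwoNumbers_alt (a : List Int) : List Int :=
  let counts : PySem.Dict Int Int :=
    a.foldl (fun d i => d.insert i (d.getD i 0 + 1)) PySem.Dict.empty
  PySem.List.sorted
    ((counts.items.filter (fun p => PySem.Int.mod p.2 2 == 1)).map (fun p => p.1))
    (fun x => x) false

-- ===== PRECONDITION & SPEC =====
def Spec_theTwoNumbers (a : List Int) (out : List Int) : Prop := out = theTwoNumbers_alt a
instance (a : List Int) (out : List Int) : Decidable (Spec_theTwoNumbers a out) := by unfold Spec_theTwoNumbers; infer_instance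

-- ===== CLAIM (what is proved, stated in full; the proofs are below) =====
def Claim_equal_theTwoNumbers : Prop := ∀ (a : List Int), Dom_theTwoNumbers a → Spec_theTwoNumbers a (theTwoNumbers a)

-- ===== LEMMAS AND PROOFS =====

-- the toggled set: membership xors with count parity; nodup is preserved
theorem toggle_nodup (l : List Int) (s : PySem.Set Int) (hs : s.Nodup) :
    (l.foldl (fun s i => if PySem.Set.contains s i then PySem.Set.discard s i else PySem.Set.add s i) s).Nodup := by
  induction l generalizing s with
  | nil => exact hs
  | cons x xs ih =>
      simp only [List.foldl_cons]
      split
      · exact ih _ (PySem.Set.nodup_discard _ _ hs)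
      · exact ih _ (PySem.Set.nodup_add _ _ hs)

theorem toggle_mem (l : List Int) (s : PySem.Set Int) (x : Int) :
    (x ∈ l.foldl (fun s i => if PySem.Set.contains s i then PySem.Set.discard s i else PySem.Set.add s i) s)
      ↔ (if x ∈ s then l.count x % 2 = 0 else l.count x % 2 = 1) := by
  induction l generalizing s with
  | nil => simp
  | cons y ys ih =>
      simp only [List.foldl_cons]
      rw [ih]
      by_cases hy : y ∈ s <;> rcases eq_or_ne x y with rfl | hxy <;>
        simp_all [PySem.Set.mem_discard, PySem.Set.mem_add, PySem.Set.contains_iff,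
          List.count_cons, ne_comm] <;> omega

-- B's key list: odd-count members of a
theorem oddkeys_mem (a : List Int) (x : Int) :
    (x ∈ (((PySem.Dict.counter a).items.filter (fun p => PySem.Int.mod p.2 2 == 1)).map (fun p => p.1)))
      ↔ a.count x % 2 = 1 := by
  rw [PySem.Dict.items_counter]
  simp only [List.filter_map, List.map_map, List.mem_map, List.mem_filter]
  constructor
  · rintro ⟨k, ⟨hk, hodd⟩, rfl⟩
    have : PySem.Int.mod ((a.count k : Nat) : Int) 2 = 1 := by simpa using hodd
    rw [show ((2:Int)) = ((2:Nat):Int) by norm_num, PySem.Int.mod_natCast] at this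
    exact_mod_cast this
  · intro h
    refine ⟨x, ⟨?_, ?_⟩, rfl⟩
    · rw [PySem.Set.mem_ofList]
      exact List.count_pos_iff.mp (by omega)
    · simp only [Function.comp]
      rw [show ((2:Int)) = ((2:Nat):Int) by norm_num, PySem.Int.mod_natCast]
      simp [h]

theorem oddkeys_nodup (a : List Int) :
    ((((PySem.Dict.counter a).items.filter (fun p => PySem.Int.mod p.2 2 == 1)).map (fun p => p.1))).Nodup := by
  rw [PySem.Dict.items_counter, List.filter_map, List.map_map]
  have : (fun p : Int × Int => p.1) ∘ (fun k => (k, (a.count k : Int))) = id := rfl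
  rw [this, List.map_id]
  exact (PySem.Set.nodup_ofList a).filter _

-- ===== VERDICT (by name: the statement is the Claim_ definition above) =====
theorem theTwoNumbers_spec : Claim_equal_theTwoNumbers := by
  intro a _
  unfold Spec_theTwoNumbers theTwoNumbers theTwoNumbers_alt
  simp only []
  rw [PySem.Dict.foldl_insert_getD_add_one_eq_counter]
  apply PySem.List.sorted_eq_sorted_of_perm
  · exact fun x y h => h
  · refine (List.perm_ext_iff_of_nodup (toggle_nodup a PySem.Set.empty List.nodup_nil) (oddkeys_nodup a)).mpr ?_
    intro x
    rw [toggle_mem, oddkeys_mem]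
    simp [PySem.Set.empty]
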